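-- pv_equiv track=rewrite | github.com/PeterJacob/beagle | plotting.py | appropriate_score
-- ===== SOURCE A (Python) =====
-- def appropriate_score(column_names, dataset, dataset_meta):
--     """Returns a score for appropriateness of a category count plot"""
--     probable_types = [dataset_meta[column_name]['probable_type']
--                       for column_name in column_names]
--     if (len(column_names) == 2 and
--         (sorted(probable_types) == ['Category', 'Category'] or
--          sorted(probable_types) == ['Binary', 'Category'] or
--          sorted(probable_types) == ['Binary', 'Binary'])):
--         return 2  # Very appropriate
--     else:
--         return 0  # Not appropriate
-- ===== SOURCE B (Python) =====
-- def appropriate_score(column_names, dataset, dataset_meta):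
--     """Returns a score for appropriateness of a category count plot"""
--     total = 0
--     valid = 0
--     for column_name in column_names:
--         t = dataset_meta[column_name]['probable_type']
--         total += 1
--         if t == 'Binary' or t == 'Category':
--             valid += 1
--     return 2 if valid == 2 and total == 2 else 0
-- ===== Notes on version B (the rewrite author's own statement) =====
-- stated objective: simpler
-- what changed: Replaces A's materialize-then-sort-and-compare pipeline (build probable_types, sort it, compare against the three enumerated valid pairs) by a single imperative pass that maintains two integer counters (total columns, columns whose type is Binary/Category) and returns 2 iff valid == total == 2; no intermediate list and no sorting.
import Mathlib
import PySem

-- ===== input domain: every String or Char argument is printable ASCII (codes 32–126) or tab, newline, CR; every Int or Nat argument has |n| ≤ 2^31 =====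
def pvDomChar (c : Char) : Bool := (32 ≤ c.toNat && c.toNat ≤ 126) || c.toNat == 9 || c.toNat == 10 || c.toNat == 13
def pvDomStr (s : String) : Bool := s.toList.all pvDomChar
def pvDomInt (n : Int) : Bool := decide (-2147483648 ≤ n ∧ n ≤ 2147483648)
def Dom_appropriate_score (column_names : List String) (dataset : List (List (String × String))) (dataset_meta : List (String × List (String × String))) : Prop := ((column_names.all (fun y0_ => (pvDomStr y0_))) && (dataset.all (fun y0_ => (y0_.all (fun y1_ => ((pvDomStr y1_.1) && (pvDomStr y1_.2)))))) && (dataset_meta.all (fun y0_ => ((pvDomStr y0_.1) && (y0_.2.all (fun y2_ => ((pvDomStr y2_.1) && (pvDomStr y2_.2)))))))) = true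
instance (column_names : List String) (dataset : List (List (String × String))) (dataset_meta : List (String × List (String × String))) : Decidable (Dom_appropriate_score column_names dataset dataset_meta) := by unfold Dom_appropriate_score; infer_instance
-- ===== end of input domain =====

-- B replaces A's materialize/sort/compare-three-pairs pipeline by a single counting pass with
-- two integer accumulators (objective: simpler); return-value equivalence on Pre_ (no KeyError).
-- ===== PORT A =====
-- dataset_meta[column_name]['probable_type'] (dict lookups; "" default is never reached inside
-- Pre_, where Python would raise KeyError instead)
def pvProbableType (dataset_meta : List (String × List (String × String))) (c : String) : String :=
  (PySem.Dict.mk ((PySem.Dict.mk dataset_meta).getD c [])).getD "probable_type" ""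

def appropriate_score (column_names : List String) (dataset : List (List (String × String))) (dataset_meta : List (String × List (String × String))) : Int :=
  let probable_types := column_names.map (pvProbableType dataset_meta)
  if column_names.length == 2 &&
      (PySem.List.sorted probable_types (fun x => x) false == ["Category", "Category"] ||
       PySem.List.sorted probable_types (fun x => x) false == ["Binary", "Category"] ||
       PySem.List.sorted probable_types (fun x => x) false == ["Binary", "Binary"]) then
    2
  else
    0

-- ===== PORT B =====
-- the loop body: state (total, valid), one lookup per column name
def pvStep (dataset_meta : List (String × List (String × String))) (st : Int × Int) (column_name : String) : Int × Int :=
  let t := pvProbableType dataset_meta column_name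
  (st.1 + 1, if t == "Binary" || t == "Category" then st.2 + 1 else st.2)

def appropriate_score_alt (column_names : List String) (dataset : List (List (String × String))) (dataset_meta : List (String × List (String × String))) : Int :=
  let st : Int × Int := column_names.foldl (pvStep dataset_meta) (0, 0)
  if st.2 == 2 && st.1 == 2 then 2 else 0

-- ===== PRECONDITION & SPEC =====
-- Pre_ excludes exactly the inputs on which Python A raises KeyError: a column name missing from
-- dataset_meta, or whose metadata dict lacks the 'probable_type' key.
def Pre_appropriate_score (column_names : List String) (dataset : List (List (String × String))) (dataset_meta : List (String × List (String × String))) : Prop :=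
  (column_names.all (fun c => (PySem.Dict.mk ((PySem.Dict.mk dataset_meta).getD c [])).contains "probable_type")) = true
instance (column_names : List String) (dataset : List (List (String × String))) (dataset_meta : List (String × List (String × String))) : Decidable (Pre_appropriate_score column_names dataset dataset_meta) := by unfold Pre_appropriate_score; infer_instance
def pvWitness_appropriate_score : List String × (List (List (String × String))) × (List (String × List (String × String))) :=
  (["a", "b"], [], [("a", [("probable_type", "Binary")]), ("b", [("probable_type", "Category")])])
def Spec_appropriate_score (column_names : List String) (dataset : List (List (String × String))) (dataset_meta : List (String × List (String × String))) (out : Int) : Prop := out = appropriate_score_alt column_names dataset dataset_meta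
instance (column_names : List String) (dataset : List (List (String × String))) (dataset_meta : List (String × List (String × String))) (out : Int) : Decidable (Spec_appropriate_score column_names dataset dataset_meta out) := by unfold Spec_appropriate_score; infer_instance

-- ===== CLAIM (what is proved, stated in full; the proofs are below) =====
def Claim_equal_appropriate_score : Prop := ∀ (column_names : List String) (dataset : List (List (String × String))) (dataset_meta : List (String × List (String × String))), Dom_appropriate_score column_names dataset dataset_meta → Pre_appropriate_score column_names dataset dataset_meta → Spec_appropriate_score column_names dataset dataset_meta (appropriate_score column_names dataset dataset_meta)

-- ===== LEMMAS AND PROOFS =====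

-- the first component of B's fold counts the list: it ends at init.1 + length
lemma pv_fold_fst (dataset_meta : List (String × List (String × String)))
    (l : List String) (init : Int × Int) :
    (l.foldl (pvStep dataset_meta) init).1 = init.1 + l.length := by
  induction l generalizing init with
  | nil => simp
  | cons c cs ih => simp [List.foldl, ih, pvStep]; ring

-- The three accepted sorted pairs are exactly the pairs whose elements all lie in {Binary, Category}.
lemma pv_pair_key (a b : String) :
    ((PySem.List.sorted [a, b] (fun x => x) false == ["Category", "Category"] ||
      PySem.List.sorted [a, b] (fun x => x) false == ["Binary", "Category"] ||
      PySem.List.sorted [a, b] (fun x => x) false == ["Binary", "Binary"]) = true) ↔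
    ((a = "Binary" ∨ a = "Category") ∧ (b = "Binary" ∨ b = "Category")) := by
  constructor
  · intro h
    simp only [Bool.or_eq_true, beq_iff_eq] at h
    have hmem : ∀ x ∈ ([a, b] : List String),
        x = "Binary" ∨ x = "Category" := by
      intro x hx
      have hx' : x ∈ PySem.List.sorted [a, b] (fun y => y) false :=
        (PySem.List.mem_sorted _ _ _ _).2 hx
      rcases h with (h | h) | h <;> simp only [h] at hx' <;> simp at hx' <;> tauto
    exact ⟨hmem a (by simp), hmem b (by simp)⟩
  · rintro ⟨ha | ha, hb | hb⟩ <;> subst ha <;> subst hb <;>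
      simp [PySem.List.sorted, PySem.List.insertBy] <;> decide

theorem appropriate_score_spec_aux (column_names : List String) (dataset : List (List (String × String))) (dataset_meta : List (String × List (String × String))) :
    appropriate_score column_names dataset dataset_meta =
      appropriate_score_alt column_names dataset dataset_meta := by
  unfold appropriate_score appropriate_score_alt
  match column_names with
  | [c1, c2] =>
      simp only [List.map, List.length, beq_self_eq_true, Bool.true_and, List.foldl, pvStep]
      by_cases h1 : (pvProbableType dataset_meta c1 == "Binary" ||
                     pvProbableType dataset_meta c1 == "Category") = true <;>
      by_cases h2 : (pvProbableType dataset_meta c2 == "Binary" ||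
                     pvProbableType dataset_meta c2 == "Category") = true
      · rw [if_pos ((pv_pair_key _ _).2 ⟨by simpa using h1, by simpa using h2⟩)]
        simp [h1, h2]
      · rw [if_neg (fun hc => h2 (by simpa using ((pv_pair_key _ _).1 hc).2))]
        simp [h1, h2]
      · rw [if_neg (fun hc => h1 (by simpa using ((pv_pair_key _ _).1 hc).1))]
        simp [h1, h2]
      · rw [if_neg (fun hc => h1 (by simpa using ((pv_pair_key _ _).1 hc).1))]
        simp [h1, h2]
  | [] => rfl
  | [c] =>
      simp only [List.length, List.foldl, pvStep]
      split <;> simp_all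
  | c1 :: c2 :: c3 :: rest =>
      rw [if_neg (by simp [List.length]), if_neg (by
        intro hc
        simp only [Bool.and_eq_true, beq_iff_eq] at hc
        have h2 := hc.2
        rw [pv_fold_fst] at h2
        simp [List.length] at h2
        omega)]

-- ===== VERDICT (by name: the statement is the Claim_ definition above) =====
theorem appropriate_score_spec : Claim_equal_appropriate_score := by
  intro column_names dataset dataset_meta _ _
  unfold Spec_appropriate_score
  exact appropriate_score_spec_aux column_names dataset dataset_meta
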